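-- pv_equiv track=rewrite | github.com/kseenyoung/programmers | level1/햄버거 만들기.py | solution
-- ===== SOURCE A (Python) =====
-- def solution(ingredient):
--     answer = []
--     count = 0
--     for i in ingredient:
--         answer.append(i)
--         if answer[-4:] == [1, 2, 3, 1]:
--             count += 1
--             for _ in range(4):
--                 answer.pop()  # 중요
--     return count
-- ===== SOURCE B (Python) =====
-- def solution(ingredient):
--     lst = list(ingredient)
--     count = 0
--     while True:
--         for i in range(len(lst) - 3):
--             if lst[i:i + 4] == [1, 2, 3, 1]:
--                 del lst[i:i + 4]
--                 count += 1
--                 break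
--         else:
--             return count
-- ===== Notes on version B (the rewrite author's own statement) =====
-- stated objective: alternative
-- what changed: Replaces the single-pass stack simulation by repeated leftmost-match removal: B scans a working copy for the first index whose 4-element slice equals [1,2,3,1], deletes it, and restarts until no match remains.
import Mathlib
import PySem

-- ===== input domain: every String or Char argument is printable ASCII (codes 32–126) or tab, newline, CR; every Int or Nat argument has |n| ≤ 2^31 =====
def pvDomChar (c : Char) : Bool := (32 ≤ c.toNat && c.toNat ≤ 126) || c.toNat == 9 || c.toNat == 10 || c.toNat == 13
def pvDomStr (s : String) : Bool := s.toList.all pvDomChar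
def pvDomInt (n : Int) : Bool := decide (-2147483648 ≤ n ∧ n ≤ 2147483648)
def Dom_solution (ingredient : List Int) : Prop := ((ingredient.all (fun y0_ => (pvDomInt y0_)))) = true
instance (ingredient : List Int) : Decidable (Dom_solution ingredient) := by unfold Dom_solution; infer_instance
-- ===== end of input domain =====

-- B is an alternative exact algorithm (repeated leftmost-match removal) of similar cost; A is the single stack pass.

-- ===== PORT A =====
-- the for loop over `ingredient`, carrying (answer, count); answer[-4:] is the PySem slice,
-- the four pops are four dropLast
def solutionLoop (answer : List Int) (count : Int) : List Int → Int
  | [] => count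
  | i :: rest =>
      let ans := answer ++ [i]
      if PySem.List.slice ans (some (-4)) none = ([1, 2, 3, 1] : List Int) then
        solutionLoop ans.dropLast.dropLast.dropLast.dropLast (count + 1) rest
      else
        solutionLoop ans count rest

def solution (ingredient : List Int) : Int := solutionLoop [] 0 ingredient

-- ===== PORT B =====
-- first index i with lst[i:i+4] == [1,2,3,1] (B's inner for-scan), none if no match
def findPat : List Int → Option Nat
  | [] => none
  | a :: rest =>
      if (a :: rest).take 4 = ([1, 2, 3, 1] : List Int) then some 0
      else (findPat rest).map (· + 1)

theorem findPat_cons (a : Int) (l : List Int) :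
    findPat (a :: l) =
      if (a :: l).take 4 = ([1, 2, 3, 1] : List Int) then some 0
      else (findPat l).map (· + 1) := rfl

theorem findPat_le {l : List Int} {i : Nat} (h : findPat l = some i) : i + 4 ≤ l.length := by
  induction l generalizing i with
  | nil => simp [findPat] at h
  | cons a rest ih =>
    rw [findPat_cons] at h
    split at h
    · rename_i hp
      cases h
      have := congrArg List.length hp
      simp [List.length_take] at this
      simp
      omega
    · rcases Option.map_eq_some_iff.mp h with ⟨j, hj, rfl⟩
      have := ih hj
      simp
      omega

-- B's outer while loop: remove the leftmost match, count, repeat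
def solveB (lst : List Int) : Int :=
  match h : findPat lst with
  | none => 0
  | some i => 1 + solveB (lst.take i ++ lst.drop (i + 4))
termination_by lst.length
decreasing_by
  have := findPat_le h
  simp [List.length_take, List.length_drop]
  omega

def solution_alt (ingredient : List Int) : Int := solveB ingredient

-- ===== PRECONDITION & SPEC =====
def Spec_solution (ingredient : List Int) (out : Int) : Prop := out = solution_alt ingredient
instance (ingredient : List Int) (out : Int) : Decidable (Spec_solution ingredient out) := by unfold Spec_solution; infer_instance

-- ===== CLAIM (what is proved, stated in full; the proofs are below) =====
def Claim_equal_solution : Prop := ∀ (ingredient : List Int), Dom_solution ingredient → Spec_solution ingredient (solution ingredient)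

-- ===== LEMMAS AND PROOFS =====

theorem findPat_short {l : List Int} (h : l.length < 4) : findPat l = none := by
  induction l with
  | nil => rfl
  | cons a rest ih =>
    rw [findPat_cons, if_neg, ih (by simp at h ⊢; omega)]
    · rfl
    · intro hp
      have := congrArg List.length hp
      simp [List.length_take] at this
      simp at h
      omega

-- a prefix of an irreducible list is irreducible
theorem findPat_take {l : List Int} (h : findPat l = none) (n : Nat) :
    findPat (l.take n) = none := by
  induction l generalizing n with
  | nil => simp [findPat]
  | cons a rest ih =>
    cases n with
    | zero => rfl
    | succ m =>
      rw [findPat_cons] at h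
      split at h
      · exact absurd h (by simp)
      · rename_i hne
        rw [List.take_succ_cons, findPat_cons, if_neg, ih (Option.map_eq_none_iff.mp h) m]
        · rfl
        · intro hp
          apply hne
          have hlen := congrArg List.length hp
          have : (a :: rest.take m).take 4 = (a :: rest).take 4 := by
            rw [show a :: rest.take m = (a :: rest).take (m + 1) from rfl, List.take_take]
            congr 1
            simp [List.length_take] at hlen
            omega
          rwa [this] at hp

-- appending one element that does not complete the pattern keeps irreducibility
theorem findPat_snoc {s : List Int} {i : Int} (h : findPat s = none)
    (hne : (s ++ [i]).drop ((s ++ [i]).length - 4) ≠ ([1, 2, 3, 1] : List Int)) :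
    findPat (s ++ [i]) = none := by
  induction s with
  | nil => exact findPat_short (by simp)
  | cons a rest ih =>
    rw [findPat_cons] at h
    split at h
    · exact absurd h (by simp)
    · rename_i hpre
      by_cases h2 : rest.length < 2
      · exact findPat_short (by simp; omega)
      · rw [show (a :: rest) ++ [i] = a :: (rest ++ [i]) from rfl, findPat_cons, if_neg]
        · rw [show (none : Option Nat) = Option.map (· + 1) none from rfl]
          congr 1
          by_cases h3 : rest.length < 3
          · exact findPat_short (by simp; omega)
          · apply ih (Option.map_eq_none_iff.mp h)
            intro hp
            apply hne
            rw [show (a :: rest ++ [i]).length - 4 = ((rest ++ [i]).length - 4) + 1 from by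
                  simp; omega,
                show (a :: rest ++ [i]) = a :: (rest ++ [i]) from rfl, List.drop_succ_cons]
            exact hp
        · intro hp
          by_cases h3 : rest.length < 3
          · -- total length is exactly 4: the prefix is the whole list, excluded by hne
            apply hne
            have hl2 : rest.length = 2 := by omega
            have : (a :: rest ++ [i]).length - 4 = 0 := by simp; omega
            rw [this, List.drop_zero]
            have : (a :: (rest ++ [i])).take 4 = a :: (rest ++ [i]) := by
              apply List.take_of_length_le
              simp; omega
            exact this.symm.trans hp
          · apply hpre
            have : (a :: (rest ++ [i])).take 4 = (a :: rest).take 4 := by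
              rw [show a :: (rest ++ [i]) = (a :: rest) ++ [i] from rfl,
                  List.take_append_of_le_length (by simp; omega)]
            rwa [this] at hp

-- if s is irreducible and appending i completes the pattern at the end, the leftmost
-- occurrence in s ++ i :: r is exactly at index s.length - 3
theorem findPat_concat {s : List Int} {i : Int} (r : List Int) (h : findPat s = none)
    (hlen : 3 ≤ s.length)
    (hp : s.drop (s.length - 3) ++ [i] = ([1, 2, 3, 1] : List Int)) :
    findPat (s ++ i :: r) = some (s.length - 3) := by
  induction s with
  | nil => simp at hlen
  | cons a rest ih =>
    rw [findPat_cons] at h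
    split at h
    · exact absurd h (by simp)
    · rename_i hpre
      by_cases h3 : rest.length < 3
      · -- s has length exactly 3: the pattern sits at the front
        have hl2 : rest.length = 2 := by simp at hlen; omega
        have h0 : (a :: rest).length - 3 = 0 := by simp; omega
        rw [h0] at hp ⊢
        simp only [List.drop_zero] at hp
        rw [show (a :: rest) ++ i :: r = a :: (rest ++ i :: r) from rfl, findPat_cons, if_pos]
        rcases rest with _ | ⟨b, _ | ⟨c, _ | _⟩⟩ <;> simp_all
      · -- s longer: prefix check fails, recurse
        have step : (a :: rest).length - 3 = (rest.length - 3) + 1 := by simp; omega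
        rw [show (a :: rest) ++ i :: r = a :: (rest ++ i :: r) from rfl, findPat_cons, if_neg]
        · rw [ih (Option.map_eq_none_iff.mp h) (by omega) ?_]
          · simp
            omega
          · have : (a :: rest).drop ((a :: rest).length - 3) = rest.drop (rest.length - 3) := by
              rw [step, List.drop_succ_cons]
            rwa [this] at hp
        · intro hpc
          apply hpre
          have : (a :: (rest ++ i :: r)).take 4 = (a :: rest).take 4 := by
            rw [show a :: (rest ++ i :: r) = (a :: rest) ++ i :: r from rfl,
                List.take_append_of_le_length (by simp; omega)]
          rwa [this] at hpc

-- main invariant: running A's loop from an irreducible stack s counts exactly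
-- B's leftmost-removal steps on s ++ r
theorem loop_eq (r : List Int) : ∀ (s : List Int) (c : Int), findPat s = none →
    solutionLoop s c r = c + solveB (s ++ r) := by
  induction r with
  | nil =>
    intro s c h
    rw [solutionLoop, List.append_nil, solveB]
    split
    · simp
    · rename_i i hi; rw [h] at hi; cases hi
  | cons i r ih =>
    intro s c h
    rw [solutionLoop]
    have hslice : PySem.List.slice (s ++ [i]) (some (-4)) none
        = (s ++ [i]).drop ((s ++ [i]).length - 4) := by
      rw [PySem.List.slice_from_neg_ofNat _ 4 (by omega)]
    by_cases hpat : (s ++ [i]).drop ((s ++ [i]).length - 4) = ([1, 2, 3, 1] : List Int)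
    · rw [if_pos (by rw [hslice]; exact hpat)]
      have hlen : 3 ≤ s.length := by
        by_contra hc
        have := congrArg List.length hpat
        simp at this hc
        omega
      have hk4 : (s.length - 3) + 4 = s.length + 1 := by omega
      have hp' : s.drop (s.length - 3) ++ [i] = ([1, 2, 3, 1] : List Int) := by
        have h1 : (s ++ [i]).length - 4 = s.length - 3 := by
          simp only [List.length_append, List.length_cons, List.length_nil]
          omega
        have hle : s.length - 3 ≤ s.length := by omega
        rw [h1, List.drop_append_of_le_length hle] at hpat
        exact hpat
      have hfind := findPat_concat r h hlen hp'
      have hrem : (s ++ i :: r).take (s.length - 3) ++ (s ++ i :: r).drop ((s.length - 3) + 4)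
          = s.take (s.length - 3) ++ r := by
        congr 1
        · rw [List.take_append_of_le_length (by omega)]
        · rw [hk4, show s ++ i :: r = (s ++ [i]) ++ r from by simp,
              show s.length + 1 = (s ++ [i]).length from by simp, List.drop_left]
      -- B takes one step removing exactly that occurrence
      have hB : solveB (s ++ i :: r) = 1 + solveB (s.take (s.length - 3) ++ r) := by
        rw [solveB]
        split
        · rename_i hn; rw [hfind] at hn; cases hn
        · rename_i j hj
          rw [hfind] at hj
          cases hj
          rw [hrem]
      -- A's four pops give the same reduced stack
      have hstack : (s ++ [i]).dropLast.dropLast.dropLast.dropLast = s.take (s.length - 3) := by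
        have e : ∀ (l : List Int), l.dropLast = l.take (l.length - 1) := by
          intro l; rw [List.dropLast_eq_take]
        rw [e, e, e, e]
        simp [List.take_take, List.length_take]
        omega
      rw [hstack, ih _ (c + 1) (findPat_take h _), hB]
      ring
    · rw [if_neg (by rw [hslice]; exact hpat)]
      rw [ih _ c (findPat_snoc h hpat)]
      congr 1
      simp

-- ===== VERDICT (by name: the statement is the Claim_ definition above) =====
theorem solution_spec : Claim_equal_solution := by
  intro ingredient _
  show solution ingredient = solution_alt ingredient
  rw [solution, solution_alt, loop_eq ingredient [] 0 rfl]
  simp
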